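-- pv_equiv track=rewrite | github.com/CaioMM/checkPriceKaBuM | checkLib.py | check3080
-- ===== SOURCE A (Python) =====
-- def check3080(data):
-- 	code = ['3','0','8','0','*']
-- 	nome = data['nome'].replace(" ","").replace(",","")
-- 	hit = 0
-- 	for letra in nome:
-- 		if letra.upper() == code[0]:
-- 			code.pop(0)
-- 			hit += 1
-- 		elif hit != 0:
-- 			break
-- 	return (len(code)==1)
-- ===== SOURCE B (Python) =====
-- def check3080(data):
--     nome = data['nome'].replace(" ", "").replace(",", "")
--     i = nome.find('3')
--     return i != -1 and nome[i:i+4] == '3080'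
-- ===== Notes on version B (the rewrite author's own statement) =====
-- stated objective: simpler
-- what changed: Replaces the per-character loop with its mutable code list, pop(0) and hit counter by locating the first '3' with str.find and comparing the four-character window nome[i:i+4] against '3080' with one slice comparison.
-- intended difference: On inputs whose cleaned name, starting at its first '3', reads exactly '3080*' and then ends, A pops the '*' sentinel off its pattern list and returns False although the name contains '3080'; B returns True, which is the intended answer. — e.g. on check3080([("nome", "3080*")]): A returns false, B returns true
import Mathlib
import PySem

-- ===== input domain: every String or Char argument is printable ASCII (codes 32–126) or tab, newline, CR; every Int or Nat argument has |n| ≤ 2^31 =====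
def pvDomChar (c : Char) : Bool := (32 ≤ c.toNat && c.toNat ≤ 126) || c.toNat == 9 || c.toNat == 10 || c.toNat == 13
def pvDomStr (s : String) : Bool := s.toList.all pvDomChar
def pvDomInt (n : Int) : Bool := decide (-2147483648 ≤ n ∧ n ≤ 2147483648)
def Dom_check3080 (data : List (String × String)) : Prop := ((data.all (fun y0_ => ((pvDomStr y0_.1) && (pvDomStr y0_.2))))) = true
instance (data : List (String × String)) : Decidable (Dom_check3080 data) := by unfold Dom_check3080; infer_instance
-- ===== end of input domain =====

-- B replaces A's per-character loop with pattern list, pop(0) and hit counter by str.find plus one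
-- four-character slice comparison (objective: simpler).

-- ===== PORT A =====
-- the 'for letra in nome' loop: state = (code, hit); 'break' and loop end both return the state.
-- Python evaluates code[0] first: on an empty code it raises IndexError — modelled by returning the
-- state unchanged; exactly those inputs are excluded by Pre_check3080.
def check3080Loop : List Char → List Char → Nat → (List Char × Nat)
  | [], code, hit => (code, hit)
  | letra :: rest, code, hit =>
    match code with
    | [] => ([], hit)  -- Python: IndexError (outside Pre_check3080)
    | c0 :: ctail =>
      if PySem.Chars.upperChar letra == c0 then
        check3080Loop rest ctail (hit + 1)
      else if hit ≠ 0 then (code, hit)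
      else check3080Loop rest code hit

def check3080 (data : List (String × String)) : Bool :=
  match (PySem.Dict.mk data).get? "nome" with
  | none => false  -- Python: KeyError (outside Pre_check3080)
  | some v =>
    let nome := PySem.Chars.replace (PySem.Chars.replace v.toList [' '] []) [','] []
    ((check3080Loop nome ['3', '0', '8', '0', '*'] 0).1.length == 1)

-- ===== PORT B =====
def check3080_alt (data : List (String × String)) : Bool :=
  match (PySem.Dict.mk data).get? "nome" with
  | none => false  -- Python: KeyError (outside Pre_check3080)
  | some v =>
    let nome := PySem.Chars.replace (PySem.Chars.replace v.toList [' '] []) [','] []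
    let i := PySem.Chars.find nome ['3']
    (i != -1) && (PySem.List.slice nome (some i) (some (i + 4)) == ['3', '0', '8', '0'])

-- ===== PRECONDITION & SPEC =====
-- Pre_ excludes (a) inputs without a 'nome' key (A and B raise KeyError) and (b) inputs whose cleaned
-- name, from its first '3', starts with '3080*' followed by at least one more character (A raises
-- IndexError: code[0] on the emptied pattern list).
-- the cleaned name from its first '3' onwards ([] if it has no '3')
def pvAfter3 (v : String) : List Char :=
  (v.toList.filter (fun c => c != ' ' && c != ',')).dropWhile (fun c => c != '3')

-- test: the cleaned name, from its first '3', starts with '3080*' and has at least one more char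
def pvOverrun (v : String) : Bool :=
  (['3', '0', '8', '0', '*'] : List Char).isPrefixOf (pvAfter3 v) && decide (6 ≤ (pvAfter3 v).length)

def Pre_check3080 (data : List (String × String)) : Prop :=
  (match (PySem.Dict.mk data).get? "nome" with
   | none => false
   | some v => !pvOverrun v) = true
instance (data : List (String × String)) : Decidable (Pre_check3080 data) := by
  unfold Pre_check3080; infer_instance

def pvWitness_check3080 : (List (String × String)) := [("nome", "RTX 3080 Ti")]

-- On inputs whose cleaned name, starting at its first '3', reads exactly '3080*' and then ends, A pops
-- the '*' sentinel off its pattern list and returns False although the name contains '3080'; B returns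
-- True, which is the intended answer.
def D_check3080 (data : List (String × String)) : Prop :=
  Option.map pvAfter3 (List.lookup "nome" data) = some "3080*".toList
instance (data : List (String × String)) : Decidable (D_check3080 data) := by
  unfold D_check3080; infer_instance

def Spec_check3080 (data : List (String × String)) (out : Bool) : Prop :=
  ¬ D_check3080 data → out = check3080_alt data
instance (data : List (String × String)) (out : Bool) : Decidable (Spec_check3080 data out) := by
  unfold Spec_check3080; infer_instance

def pvDiffWitness_check3080 : (List (String × String)) := [("nome", "3080*")]
def pvDiffWitnessOut_check3080 : Bool × Bool := (false, true)

-- ===== CLAIM (what is proved, stated in full; the proofs are below) =====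
def Claim_unchanged_check3080 : Prop := ∀ (data : List (String × String)), Dom_check3080 data → Pre_check3080 data → Spec_check3080 data (check3080 data)
def Claim_changed_check3080 : Prop := Dom_check3080 (pvDiffWitness_check3080) ∧ Pre_check3080 (pvDiffWitness_check3080) ∧ D_check3080 (pvDiffWitness_check3080) ∧ check3080 (pvDiffWitness_check3080) = pvDiffWitnessOut_check3080.1 ∧ check3080_alt (pvDiffWitness_check3080) = pvDiffWitnessOut_check3080.2 ∧ pvDiffWitnessOut_check3080.1 ≠ pvDiffWitnessOut_check3080.2
def Claim_exact_check3080 : Prop := ∀ (data : List (String × String)), Dom_check3080 data → Pre_check3080 data → D_check3080 data → check3080 data ≠ check3080_alt data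

-- ===== LEMMAS AND PROOFS =====
-- first-match dict lookup is List.lookup
lemma get?_mk_eq_lookup (data : List (String × String)) (k : String) :
    (PySem.Dict.mk data).get? k = data.lookup k := by
  induction data with
  | nil => rfl
  | cons p rest ih =>
    rw [List.lookup_cons, PySem.Dict.get?_mk_cons, ih]
    by_cases hk : p.1 = k
    · simp [hk]
    · have h1 : (p.1 == k) = false := beq_eq_false_iff_ne.2 hk
      have h2 : (k == p.1) = false := beq_eq_false_iff_ne.2 (Ne.symm hk)
      simp [h1, h2]

-- removing every ' ' (resp. ',') with str.replace is filtering it out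
lemma replace_go_single (a : Char) :
    ∀ (fuel : Nat) (l acc : List Char), l.length ≤ fuel →
      PySem.Chars.replace.go [a] [] fuel l acc
        = acc.reverse ++ l.filter (fun c => !(c == a)) := by
  intro fuel
  induction fuel with
  | zero =>
    intro l acc hl
    have : l = [] := List.eq_nil_of_length_eq_zero (by omega)
    subst this
    simp [PySem.Chars.replace.go]
  | succ n ih =>
    intro l acc hl
    match l with
    | [] => simp [PySem.Chars.replace.go]
    | c :: t =>
      rw [PySem.Chars.replace.go]
      by_cases hc : c = a
      · subst hc
        have hpre : ([c] : List Char).isPrefixOf (c :: t) = true := by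
          simp [List.isPrefixOf]
        rw [if_pos hpre]
        have hdrop : List.drop ([c] : List Char).length (c :: t) = t := rfl
        rw [hdrop]
        simp only [List.length_cons] at hl
        rw [ih _ _ (by omega)]
        simp
      · have hpre : ([a] : List Char).isPrefixOf (c :: t) = false := by
          simp [List.isPrefixOf]
          exact fun hh => hc hh.symm
        rw [if_neg (by simp [hpre])]
        simp only [List.length_cons] at hl
        rw [ih _ _ (by omega)]
        simp [hc]

lemma replace_single_nil (a : Char) (s : List Char) :
    PySem.Chars.replace s [a] [] = s.filter (fun c => !(c == a)) := by
  rw [PySem.Chars.replace]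
  rw [if_neg (by simp)]
  rw [replace_go_single a s.length s [] le_rfl]
  simp

lemma clean_eq (v : String) :
    PySem.Chars.replace (PySem.Chars.replace v.toList [' '] []) [','] []
      = v.toList.filter (fun c => c != ' ' && c != ',') := by
  rw [replace_single_nil, replace_single_nil, List.filter_filter]
  apply List.filter_congr
  intro c _
  cases hc1 : (c == ' ') <;> cases hc2 : (c == ',') <;> simp_all

lemma upperChar_eq_low (c d : Char) (hd : d.toNat ≤ 64) :
    PySem.Chars.upperChar c = d ↔ c = d := by
  unfold PySem.Chars.upperChar PySem.Chars.islower
  split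
  · rename_i h
    simp only [Bool.and_eq_true, decide_eq_true_eq] at h
    have h1 : 97 ≤ c.toNat := Nat.succ_le_of_lt h.1
    have h2 : c.toNat ≤ 122 := Nat.le_of_lt_succ (Nat.lt_succ_of_le h.2)
    have hv : (Char.ofNat (c.toNat - 32)).toNat = c.toNat - 32 := by
      rw [Char.toNat_ofNat]
      rw [if_pos]
      unfold Nat.isValidChar
      left; omega
    constructor
    · intro he
      have := congrArg Char.toNat he
      rw [hv] at this; omega
    · intro he
      subst he; omega
  · exact Iff.rfl

lemma up3 (c : Char) : PySem.Chars.upperChar c = '3' ↔ c = '3' := upperChar_eq_low c '3' (by decide)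
lemma up0 (c : Char) : PySem.Chars.upperChar c = '0' ↔ c = '0' := upperChar_eq_low c '0' (by decide)
lemma up8 (c : Char) : PySem.Chars.upperChar c = '8' ↔ c = '8' := upperChar_eq_low c '8' (by decide)
lemma upStar (c : Char) : PySem.Chars.upperChar c = '*' ↔ c = '*' := upperChar_eq_low c '*' (by decide)

lemma loop_phase0 (pre rest : List Char) (h : ∀ c ∈ pre, c ≠ '3') :
    check3080Loop (pre ++ rest) ['3', '0', '8', '0', '*'] 0
      = check3080Loop rest ['3', '0', '8', '0', '*'] 0 := by
  induction pre with
  | nil => rfl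
  | cons c pre ih =>
    have hc : c ≠ '3' := h c (by simp)
    simp only [List.cons_append, check3080Loop, beq_iff_eq, up3, if_neg hc]
    simpa using ih (fun x hx => h x (by simp [hx]))

lemma loop_run (t : List Char) (h : t.take 4 ≠ ['0', '8', '0', '*']) :
    ((check3080Loop t ['0', '8', '0', '*'] 1).1.length == 1)
      = decide (t.take 3 = ['0', '8', '0']) := by
  match t with
  | [] => rfl
  | a :: t1 =>
    by_cases ha : a = '0'
    · subst ha
      match t1 with
      | [] => rfl
      | b :: t2 =>
        by_cases hb : b = '8'
        · subst hb
          match t2 with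
          | [] => rfl
          | c :: t3 =>
            by_cases hc : c = '0'
            · subst hc
              match t3 with
              | [] => rfl
              | d :: t4 =>
                have hd : d ≠ '*' := by
                  intro hh; subst hh; exact h rfl
                simp [check3080Loop, up0, up8, upStar, hd]
            · simp [check3080Loop, up0, up8, hc]
        · simp [check3080Loop, up0, up8, hb]
    · simp [check3080Loop, up0, ha]

lemma dropWhile_no3 (pre rest : List Char) (h : ∀ c ∈ pre, c ≠ '3') :
    (pre ++ '3' :: rest).dropWhile (fun c => c != '3') = '3' :: rest := by
  induction pre with
  | nil => simp
  | cons c pr ih =>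
    have hc : c ≠ '3' := h c (by simp)
    simp only [List.cons_append, List.dropWhile_cons]
    rw [if_pos (by simp [hc])]
    exact ih (fun x hx => h x (by simp [hx]))

lemma core (s : List Char)
    (h5 : (s.dropWhile (fun c => c != '3')).take 5 ≠ ['3', '0', '8', '0', '*']) :
    ((check3080Loop s ['3', '0', '8', '0', '*'] 0).1.length == 1)
      = ((PySem.Chars.find s ['3'] != -1) &&
         (PySem.List.slice s (some (PySem.Chars.find s ['3'])) (some (PySem.Chars.find s ['3'] + 4))
            == ['3', '0', '8', '0'])) := by
  by_cases hneg : PySem.Chars.find s ['3'] = -1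
  · -- no '3' in s: A scans the whole string without a hit, B's find is -1
    have hmem : '3' ∉ s := by
      have := (PySem.Chars.find_eq_neg_one_iff s ['3']).1 hneg
      rw [List.singleton_infix_iff] at this
      exact this
    have hA : check3080Loop s ['3', '0', '8', '0', '*'] 0
        = check3080Loop [] ['3', '0', '8', '0', '*'] 0 := by
      have := loop_phase0 s [] (fun c hc hh => hmem (hh ▸ hc))
      simpa using this
    simp [hA, check3080Loop, hneg]
  · have hge : 0 ≤ PySem.Chars.find s ['3'] := by
      have := PySem.Chars.neg_one_le_find s ['3']
      omega
    set i := PySem.Chars.find s ['3'] with hi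
    obtain ⟨hpref, hmin⟩ := PySem.Chars.find_spec (sub := ['3']) (s := s) (hi ▸ hge)
    obtain ⟨t, ht⟩ := hpref
    have htoN : i.toNat ≤ s.length := by
      have := PySem.Chars.find_le_length s ['3']
      omega
    have hlen : s.length = i.toNat + 1 + t.length := by
      have := congrArg List.length ht
      simp [List.length_drop] at this
      omega
    -- the part before the first '3' contains no '3'
    have hpre3 : ∀ c ∈ s.take i.toNat, c ≠ '3' := by
      intro c hc he
      rw [List.mem_take_iff_getElem] at hc
      obtain ⟨j, hj, hje⟩ := hc
      have hjlen : j < s.length := by omega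
      have : (['3'] : List Char) <+: s.drop j := by
        refine ⟨s.drop (j + 1), ?_⟩
        rw [List.drop_eq_getElem_cons hjlen, hje, he]
        rfl
      exact hmin j (by omega) this
    -- A runs through the prefix, then matches '3' and continues with t
    have hA : check3080Loop s ['3', '0', '8', '0', '*'] 0
        = check3080Loop t ['0', '8', '0', '*'] 1 := by
      conv_lhs => rw [← List.take_append_drop i.toNat s, ← ht]
      rw [loop_phase0 _ _ hpre3]
      simp [check3080Loop, up3]
    -- slices start at the first '3'
    have hsl : ∀ k : Nat, PySem.List.slice s (some i) (some (i + (k : Int))) = ('3' :: t).take k := by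
      intro k
      rw [PySem.List.slice_toNat s hge (by omega), ← ht]
      have h1 : (i + (k : Int)).toNat - i.toNat = k := by omega
      rw [h1]
      rfl
    have hsl4 := hsl 4
    norm_num at hsl4
    have hdw : s.dropWhile (fun c => c != '3') = '3' :: t := by
      conv_lhs => rw [← List.take_append_drop i.toNat s, ← ht]
      exact dropWhile_no3 _ _ hpre3
    have ht4 : t.take 4 ≠ ['0', '8', '0', '*'] := by
      intro hteq
      apply h5
      rw [hdw]
      simp [hteq]
    rw [hA, loop_run t ht4, hsl4]
    have hne : (i != -1) = true := by simp [bne_iff_ne]; omega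
    rw [hne, Bool.true_and]
    rw [show (('3' :: List.take 3 t == ['3', '0', '8', '0'])) = (List.take 3 t == ['0', '8', '0']) by simp [List.cons_beq_cons]]
    rw [show ∀ (x y : List Char), (x == y) = decide (x = y) from fun x y => by
      by_cases hxy : x = y <;> simp [hxy]]


lemma coreD (s : List Char)
    (hD : s.dropWhile (fun c => c != '3') = ['3', '0', '8', '0', '*']) :
    ((check3080Loop s ['3', '0', '8', '0', '*'] 0).1.length == 1) = false ∧
      ((PySem.Chars.find s ['3'] != -1) &&
       (PySem.List.slice s (some (PySem.Chars.find s ['3'])) (some (PySem.Chars.find s ['3'] + 4))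
          == ['3', '0', '8', '0'])) = true := by
  have h3 : '3' ∈ s := by
    have : '3' ∈ s.dropWhile (fun c => c != '3') := by rw [hD]; simp
    exact (List.dropWhile_sublist _).mem this
  have h0 : 0 ≤ PySem.Chars.find s ['3'] :=
    (PySem.Chars.find_nonneg_iff s ['3']).2 ((List.singleton_infix_iff '3' s).2 h3)
  set i := PySem.Chars.find s ['3'] with hi
  obtain ⟨hpref, hmin⟩ := PySem.Chars.find_spec (sub := ['3']) (s := s) (hi ▸ h0)
  obtain ⟨t, ht⟩ := hpref
  have htoN : i.toNat ≤ s.length := by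
    have := PySem.Chars.find_le_length s ['3']
    omega
  have hlen : s.length = i.toNat + 1 + t.length := by
    have := congrArg List.length ht
    simp [List.length_drop] at this
    omega
  have hpre3 : ∀ c ∈ s.take i.toNat, c ≠ '3' := by
    intro c hc he
    rw [List.mem_take_iff_getElem] at hc
    obtain ⟨j, hj, hje⟩ := hc
    have hjlen : j < s.length := by omega
    have : (['3'] : List Char) <+: s.drop j := by
      refine ⟨s.drop (j + 1), ?_⟩
      rw [List.drop_eq_getElem_cons hjlen, hje, he]
      rfl
    exact hmin j (by omega) this
  have hA : check3080Loop s ['3', '0', '8', '0', '*'] 0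
      = check3080Loop t ['0', '8', '0', '*'] 1 := by
    conv_lhs => rw [← List.take_append_drop i.toNat s, ← ht]
    rw [loop_phase0 _ _ hpre3]
    simp [check3080Loop, up3]
  have hsl : ∀ k : Nat, PySem.List.slice s (some i) (some (i + (k : Int))) = ('3' :: t).take k := by
    intro k
    rw [PySem.List.slice_toNat s h0 (by omega), ← ht]
    have h1 : (i + (k : Int)).toNat - i.toNat = k := by omega
    rw [h1]
    rfl
  have hsl4 := hsl 4
  norm_num at hsl4
  have hdw : s.dropWhile (fun c => c != '3') = '3' :: t := by
    conv_lhs => rw [← List.take_append_drop i.toNat s, ← ht]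
    exact dropWhile_no3 _ _ hpre3
  have hteq : t = ['0', '8', '0', '*'] := by
    rw [hdw] at hD
    injection hD
  constructor
  · rw [hA, hteq]
    decide
  · rw [hsl4, hteq]
    simp
    omega

-- ===== VERDICT =====
theorem check3080_spec : Claim_unchanged_check3080 := by
  unfold Claim_unchanged_check3080
  intro data _dom hpre
  unfold Spec_check3080
  intro hnd
  unfold Pre_check3080 at hpre
  unfold D_check3080 at hnd
  unfold check3080 check3080_alt
  cases h : (PySem.Dict.mk data).get? "nome" with
  | none => rfl
  | some v =>
    rw [h] at hpre
    have hb' : (!pvOverrun v) = true := hpre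
    have hb : pvOverrun v = false := by rwa [Bool.not_eq_true'] at hb'
    unfold pvOverrun pvAfter3 at hb
    have hnd' : pvAfter3 v ≠ ['3', '0', '8', '0', '*'] := by
      intro he
      apply hnd
      rw [← get?_mk_eq_lookup, h, Option.map_some, he]
      rfl
    unfold pvAfter3 at hnd'
    show ((check3080Loop (PySem.Chars.replace (PySem.Chars.replace v.toList [' '] []) [','] []) ['3', '0', '8', '0', '*'] 0).1.length == 1)
        = ((PySem.Chars.find (PySem.Chars.replace (PySem.Chars.replace v.toList [' '] []) [','] []) ['3'] != -1) &&
           (PySem.List.slice (PySem.Chars.replace (PySem.Chars.replace v.toList [' '] []) [','] []) (some (PySem.Chars.find (PySem.Chars.replace (PySem.Chars.replace v.toList [' '] []) [','] []) ['3']))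
              (some (PySem.Chars.find (PySem.Chars.replace (PySem.Chars.replace v.toList [' '] []) [','] []) ['3'] + 4)) == ['3', '0', '8', '0']))
    rw [clean_eq v]
    refine core (v.toList.filter (fun c => c != ' ' && c != ',')) ?_
    intro h5
    have hlen5 : 5 ≤ ((v.toList.filter (fun c => c != ' ' && c != ',')).dropWhile (fun c => c != '3')).length := by
      have hh := congrArg List.length h5
      rw [List.length_take] at hh
      simp only [List.length_cons, List.length_nil] at hh
      omega
    by_cases h6 : 6 ≤ ((v.toList.filter (fun c => c != ' ' && c != ',')).dropWhile (fun c => c != '3')).length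
    · have hpf : (['3', '0', '8', '0', '*'] : List Char).isPrefixOf
          ((v.toList.filter (fun c => c != ' ' && c != ',')).dropWhile (fun c => c != '3')) = true := by
        rw [List.isPrefixOf_iff_prefix]
        exact ⟨_, by rw [← h5]; exact List.take_append_drop 5 _⟩
      rw [hpf, decide_eq_true h6] at hb
      exact absurd hb (by simp)
    · apply hnd'
      rw [← h5, List.take_of_length_le (by omega)]

theorem check3080_tight : Claim_exact_check3080 := by
  unfold Claim_exact_check3080
  intro data _dom _hpre hd
  unfold D_check3080 at hd
  unfold check3080 check3080_alt
  cases h : (PySem.Dict.mk data).get? "nome" with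
  | none => rw [← get?_mk_eq_lookup, h] at hd; simp at hd
  | some v =>
    rw [← get?_mk_eq_lookup, h, Option.map_some, Option.some_inj] at hd
    have hD' : pvAfter3 v = ['3', '0', '8', '0', '*'] := by rw [hd]; rfl
    unfold pvAfter3 at hD'
    obtain ⟨hAf, hBt⟩ := coreD _ hD'
    show ¬ (((check3080Loop (PySem.Chars.replace (PySem.Chars.replace v.toList [' '] []) [','] []) ['3', '0', '8', '0', '*'] 0).1.length == 1)
        = ((PySem.Chars.find (PySem.Chars.replace (PySem.Chars.replace v.toList [' '] []) [','] []) ['3'] != -1) &&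
           (PySem.List.slice (PySem.Chars.replace (PySem.Chars.replace v.toList [' '] []) [','] []) (some (PySem.Chars.find (PySem.Chars.replace (PySem.Chars.replace v.toList [' '] []) [','] []) ['3']))
              (some (PySem.Chars.find (PySem.Chars.replace (PySem.Chars.replace v.toList [' '] []) [','] []) ['3'] + 4)) == ['3', '0', '8', '0'])))
    rw [clean_eq v]
    intro hc
    rw [hAf, hBt] at hc
    exact Bool.false_ne_true hc

theorem check3080_changed : Claim_changed_check3080 := by
  unfold Claim_changed_check3080; decide
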